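-- pv_equiv track=rewrite | github.com/Limuranius/kyoto-shogi-engine | bitboard/attacks.py | _get_line_attack_mask_str
-- ===== SOURCE A (Python) =====
-- def _get_line_attack_mask_str(
--         figure_mask: str,  # str of 1 or 0, where 1 - cell is occupied
--         attacker_i: int,
--         go_left: bool,
--         go_right: bool,
-- ) -> str:
--     assert figure_mask[attacker_i] == "1"
--
--     attack_mask_str = list("00000")
--     if go_left:
--         for l in range(attacker_i - 1, -1, -1):  # searching left non-obstructed attacks
--             attack_mask_str[l] = "1"
--             if figure_mask[l] == "1":
--                 break
--     if go_right:
--         for r in range(attacker_i + 1, len(figure_mask)):  # searching right non-obstructed attacks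
--             attack_mask_str[r] = "1"
--             if figure_mask[r] == "1":
--                 break
--     attack_mask_str = "".join(attack_mask_str)
--     return attack_mask_str
-- ===== SOURCE B (Python) =====
-- def _get_line_attack_mask_str(
--         figure_mask: str,
--         attacker_i: int,
--         go_left: bool,
--         go_right: bool,
-- ) -> str:
--     assert figure_mask[attacker_i] == "1"
--     n = len(figure_mask)
--
--     def attacked(j: int) -> bool:
--         # a cell is attacked iff it lies on an enabled side of the attacker
--         # and the open interval between it and the attacker holds no piece
--         if go_left and j < attacker_i:
--             return "1" not in figure_mask[j + 1:attacker_i]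
--         if go_right and attacker_i < j < n:
--             return "1" not in figure_mask[attacker_i + 1:j]
--         return False
--
--     return "".join("1" if attacked(j) else "0" for j in range(5))
-- ===== Notes on version B (the rewrite author's own statement) =====
-- stated objective: alternative
-- what changed: Replaces A's directional scan-and-break loops that write into a mutable buffer by a closed per-cell predicate: each of the 5 output cells is computed independently as 'on an enabled side of the attacker and no piece in the open interval between them', joined by a comprehension.
-- outside the precondition, e.g. on _get_line_attack_mask_str('11', -2, False, True): A returns '00001', B returns '11000'; on _get_line_attack_mask_str('010', -2, True, True): A returns '11001', B returns '11100'
import Mathlib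
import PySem

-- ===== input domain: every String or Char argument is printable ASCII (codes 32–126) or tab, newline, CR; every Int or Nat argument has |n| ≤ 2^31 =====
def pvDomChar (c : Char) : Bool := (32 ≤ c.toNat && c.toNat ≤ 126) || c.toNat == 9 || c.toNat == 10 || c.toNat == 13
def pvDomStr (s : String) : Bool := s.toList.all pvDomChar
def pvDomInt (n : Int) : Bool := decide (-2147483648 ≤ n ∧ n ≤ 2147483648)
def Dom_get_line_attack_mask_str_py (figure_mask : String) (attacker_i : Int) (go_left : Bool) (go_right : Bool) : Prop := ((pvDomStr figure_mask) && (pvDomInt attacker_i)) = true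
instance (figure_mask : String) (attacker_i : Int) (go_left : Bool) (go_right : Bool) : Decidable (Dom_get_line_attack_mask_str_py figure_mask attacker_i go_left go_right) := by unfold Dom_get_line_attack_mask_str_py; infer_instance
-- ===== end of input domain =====

-- B replaces A's directional scan-and-break buffer writes by a closed per-cell
-- predicate (each output cell independently: enabled side + no piece strictly
-- between it and the attacker); objective: alternative decomposition, not faster.


-- ===== PORT A =====
-- Python list assignment xs[i] = c (negative index wraps; out-of-range raises, which
-- Pre_ excludes, so the out-of-range case here is a no-op)
def pvSet (xs : List Char) (i : Int) (c : Char) : List Char :=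
  let j := if i < 0 then i + (xs.length : Int) else i
  if 0 ≤ j then xs.set j.toNat c else xs

-- A's for-loop with break: mark each index, stop after the first occupied cell
def pvLoopA (fig : List Char) : List Int → List Char → List Char
  | [], acc => acc
  | l :: rest, acc =>
    let acc' := pvSet acc l '1'
    if PySem.List.pyGet? fig l = some '1' then acc' else pvLoopA fig rest acc'

def get_line_attack_mask_str_py (figure_mask : String) (attacker_i : Int) (go_left : Bool) (go_right : Bool) : String :=
  let f := figure_mask.toList
  let a0 := ['0', '0', '0', '0', '0']
  let a1 := if go_left then pvLoopA f (PySem.List.pyRange (attacker_i - 1) (-1) (-1)) a0 else a0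
  let a2 := if go_right then pvLoopA f (PySem.List.pyRange (attacker_i + 1) (f.length : Int) 1) a1 else a1
  String.mk a2

-- ===== PORT B =====
-- B's per-cell predicate: cell j is attacked iff it lies on an enabled side of the
-- attacker and the open interval between them holds no '1' ("1" not in slice)
def pvAttacked (f : List Char) (ai : Int) (gl gr : Bool) (n j : Int) : Bool :=
  if gl = true ∧ j < ai then
    !((PySem.List.slice f (some (j + 1)) (some ai)).contains '1')
  else if gr = true ∧ ai < j ∧ j < n then
    !((PySem.List.slice f (some (ai + 1)) (some j)).contains '1')
  else false

def get_line_attack_mask_str_py_alt (figure_mask : String) (attacker_i : Int) (go_left : Bool) (go_right : Bool) : String :=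
  let f := figure_mask.toList
  String.mk ((PySem.List.pyRange 0 5 1).map
    (fun j => if pvAttacked f attacker_i go_left go_right (f.length : Int) j then '1' else '0'))

-- ===== PRECONDITION & SPEC =====
-- Pre_ excludes (a) inputs where Python A raises: an unoccupied attacker cell (the assert),
-- an index ≥ len, and writes past the fixed 5-cell buffer (IndexError); and (b) negative
-- attacker_i — outside the natural domain of a board index — where A returns a value only
-- through Python's negative-index wraparound writes.
def Pre_get_line_attack_mask_str_py (figure_mask : String) (attacker_i : Int) (go_left : Bool) (go_right : Bool) : Prop :=
  0 ≤ attacker_i ∧ attacker_i < (figure_mask.toList.length : Int) ∧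
  PySem.List.pyGet? figure_mask.toList attacker_i = some '1' ∧
  (go_left = true → attacker_i ≤ 5) ∧
  (go_right = true →
    ((figure_mask.toList.length : Int) ≤ attacker_i + 1 ∨ (figure_mask.toList.length : Int) ≤ 5 ∨
      ((List.range 5).any fun j => decide (attacker_i < (j : Int)) && (figure_mask.toList[j]? == some '1')) = true))

instance (figure_mask : String) (attacker_i : Int) (go_left : Bool) (go_right : Bool) : Decidable (Pre_get_line_attack_mask_str_py figure_mask attacker_i go_left go_right) := by unfold Pre_get_line_attack_mask_str_py; infer_instance

def pvWitness_get_line_attack_mask_str_py : String × Int × Bool × Bool := ("10100", 2, true, true)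

def Spec_get_line_attack_mask_str_py (figure_mask : String) (attacker_i : Int) (go_left : Bool) (go_right : Bool) (out : String) : Prop := out = get_line_attack_mask_str_py_alt figure_mask attacker_i go_left go_right
instance (figure_mask : String) (attacker_i : Int) (go_left : Bool) (go_right : Bool) (out : String) : Decidable (Spec_get_line_attack_mask_str_py figure_mask attacker_i go_left go_right out) := by unfold Spec_get_line_attack_mask_str_py; infer_instance

-- ===== CLAIM (what is proved, stated in full; the proofs are below) =====
def Claim_equal_get_line_attack_mask_str_py : Prop := ∀ (figure_mask : String) (attacker_i : Int) (go_left : Bool) (go_right : Bool), Dom_get_line_attack_mask_str_py figure_mask attacker_i go_left go_right → Pre_get_line_attack_mask_str_py figure_mask attacker_i go_left go_right → Spec_get_line_attack_mask_str_py figure_mask attacker_i go_left go_right (get_line_attack_mask_str_py figure_mask attacker_i go_left go_right)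

-- ===== LEMMAS AND PROOFS =====

-- proof-only abstractions for A's break-loops: nearest blocker + contiguous fill
def pvScanFwd (fig : List Char) (j : Nat) : Int :=
  if h : j < fig.length then
    (if fig[j] = '1' then (j : Int) else pvScanFwd fig (j + 1))
  else -1
termination_by fig.length - j

def pvScanBwd (fig : List Char) : Nat → Int
  | 0 => -1
  | j + 1 => if fig[j]? = some '1' then (j : Int) else pvScanBwd fig j

def pvFill (acc : List Char) (lo hi : Int) : List Char :=
  (PySem.List.pyRange lo hi 1).foldl (fun a j => pvSet a j '1') acc

theorem pvSet_nonneg (xs : List Char) (i : Int) (c : Char) (h : 0 ≤ i) :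
    pvSet xs i c = xs.set i.toNat c := by
  unfold pvSet
  have h2 : ¬ i < 0 := by omega
  simp [h2, h]

theorem pvSet_length (xs : List Char) (i : Int) (c : Char) :
    (pvSet xs i c).length = xs.length := by
  by_cases h1 : i < 0
  · by_cases h2 : 0 ≤ i + (xs.length : Int) <;> simp [pvSet, h1, h2]
  · by_cases h2 : 0 ≤ i <;> simp [pvSet, h1, h2]

theorem pvSet_getElem? (xs : List Char) (i : Int) (c : Char) (h : 0 ≤ i) (j : Nat) :
    (pvSet xs i c)[j]? = if i = (j : Int) ∧ j < xs.length then some c else xs[j]? := by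
  rw [pvSet_nonneg _ _ _ h, List.getElem?_set]
  split
  · rename_i heq
    have : i = (j : Int) := by omega
    simp only [this, true_and]
    split <;> rename_i hlt
    · have hj : j < xs.length := by simpa using hlt
      rw [if_pos hj]
    · have hj : ¬ j < xs.length := by simpa using hlt
      rw [if_neg hj]
      exact (List.getElem?_eq_none (show xs.length ≤ j by omega)).symm
  · rename_i hne
    have : ¬ (i = (j : Int) ∧ j < xs.length) := by
      rintro ⟨h1, _⟩; exact hne (by omega)
    simp [this]

theorem pvFill_length (acc : List Char) (lo hi : Int) :
    (pvFill acc lo hi).length = acc.length := by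
  unfold pvFill
  induction (PySem.List.pyRange lo hi 1) generalizing acc with
  | nil => simp
  | cons x xs ih => simpa [pvSet_length] using ih (pvSet acc x '1')

theorem pvFill_getElem? (lo hi : Int) (acc : List Char) (h0 : 0 ≤ lo) (j : Nat) :
    (pvFill acc lo hi)[j]? =
      if lo ≤ (j : Int) ∧ (j : Int) < hi ∧ j < acc.length then some '1' else acc[j]? := by
  by_cases hle : hi ≤ lo
  · rw [pvFill, PySem.List.pyRange_one_eq_nil hle]
    have : ¬ (lo ≤ (j : Int) ∧ (j : Int) < hi ∧ j < acc.length) := by omega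
    simp [this]
  · have hlt : lo < hi := by omega
    have step : pvFill acc lo hi = pvFill (pvSet acc lo '1') (lo + 1) hi := by
      rw [pvFill, PySem.List.pyRange_one_cons hlt]; rfl
    rw [step, pvFill_getElem? (lo + 1) hi _ (by omega) j,
        pvSet_getElem? acc lo '1' h0 j, pvSet_length]
    by_cases hcase : lo = (j : Int) ∧ j < acc.length
    · have h1 : (lo + 1 ≤ (j : Int) ∧ (j : Int) < hi ∧ j < acc.length) ∨
          ¬ (lo + 1 ≤ (j : Int) ∧ (j : Int) < hi ∧ j < acc.length) := em _
      have h2 : lo ≤ (j : Int) ∧ (j : Int) < hi ∧ j < acc.length := ⟨by omega, by omega, hcase.2⟩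
      split <;> simp [hcase]
    · have : (lo + 1 ≤ (j : Int) ∧ (j : Int) < hi ∧ j < acc.length) ↔
          (lo ≤ (j : Int) ∧ (j : Int) < hi ∧ j < acc.length) := by
        constructor
        · rintro ⟨a, b, c⟩; exact ⟨by omega, b, c⟩
        · rintro ⟨a, b, c⟩
          refine ⟨?_, b, c⟩
          rcases lt_or_eq_of_le a with h | h
          · omega
          · exact absurd ⟨h, c⟩ hcase
      simp only [hcase, if_false]
      split <;> rename_i hx
      · rw [if_pos (this.mp hx)]
      · rw [if_neg (fun hy => hx (this.mpr hy))]
termination_by (hi - lo).toNat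
decreasing_by omega

theorem pvSet_comm (a : List Char) (j k : Int) (c c' : Char)
    (hj : 0 ≤ j) (hk : 0 ≤ k) (hne : j ≠ k) :
    pvSet (pvSet a k c) j c' = pvSet (pvSet a j c') k c := by
  rw [pvSet_nonneg _ _ _ hk, pvSet_nonneg _ _ _ hj, pvSet_nonneg _ _ _ hj,
      pvSet_nonneg _ _ _ hk]
  exact List.set_comm _ _ (by omega : k.toNat ≠ j.toNat)

theorem pvFoldSet_comm (k : Int) (c : Char) (hk : 0 ≤ k) :
    ∀ (l : List Int) (acc : List Char), (∀ j ∈ l, 0 ≤ j ∧ j ≠ k) →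
      List.foldl (fun a j => pvSet a j '1') (pvSet acc k c) l
        = pvSet (List.foldl (fun a j => pvSet a j '1') acc l) k c := by
  intro l
  induction l with
  | nil => intro acc _; simp
  | cons x xs ih =>
    intro acc hmem
    have hx := hmem x (by simp)
    simp only [List.foldl_cons]
    rw [pvSet_comm acc x k c '1' hx.1 hk hx.2]
    exact ih (pvSet acc x '1') (fun j hj => hmem j (by simp [hj]))

theorem pvFill_set_comm (acc : List Char) (lo hi k : Int) (c : Char)
    (hk0 : 0 ≤ k) (hhi : hi ≤ k) (hlo : 0 ≤ lo) :
    pvFill (pvSet acc k c) lo hi = pvSet (pvFill acc lo hi) k c := by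
  unfold pvFill
  refine pvFoldSet_comm k c hk0 _ acc ?_
  intro j hj
  have := (PySem.List.mem_pyRange_one (a := lo) (b := hi) (x := j)).mp hj
  constructor <;> omega

theorem pvScanBwd_lt (fig : List Char) (n : Nat) : pvScanBwd fig n < (n : Int) := by
  induction n with
  | zero => simp [pvScanBwd]
  | succ m ih =>
    unfold pvScanBwd
    split
    · omega
    · omega

theorem pvScanFwd_ge (fig : List Char) (j : Nat) :
    pvScanFwd fig j = -1 ∨ (j : Int) ≤ pvScanFwd fig j := by
  unfold pvScanFwd
  split
  · split
    · right; omega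
    · rcases pvScanFwd_ge fig (j + 1) with h | h
      · left; exact h
      · right; omega
  · left; rfl
termination_by fig.length - j

-- A's left break-loop = fill from the nearest left blocker
theorem loopA_left (fig : List Char) (n : Nat) (acc : List Char) :
    pvLoopA fig (PySem.List.pyRange ((n : Int) - 1) (-1) (-1)) acc
      = pvFill acc (max (pvScanBwd fig n) 0) (n : Int) := by
  induction n generalizing acc with
  | zero =>
    rw [PySem.List.pyRange_neg_one_eq_nil (by omega)]
    simp [pvLoopA, pvScanBwd, pvFill, PySem.List.pyRange_one_eq_nil (by omega : (0:Int) ≤ 0)]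
  | succ m ih =>
    rw [show ((m + 1 : Nat) : Int) - 1 = (m : Int) by push_cast; omega,
        PySem.List.pyRange_neg_one_cons (by omega : (-1:Int) < (m : Int))]
    simp only [pvLoopA]
    rw [PySem.List.pyGet?_natCast]
    by_cases hc : fig[m]? = some '1'
    · rw [if_pos hc]
      have hscan : pvScanBwd fig (m + 1) = (m : Int) := by simp [pvScanBwd, hc]
      rw [hscan, show ((m + 1 : Nat) : Int) = (m : Int) + 1 by push_cast; omega,
          show max (m : Int) 0 = (m : Int) by omega]
      unfold pvFill
      rw [PySem.List.pyRange_one_singleton]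
      simp
    · rw [if_neg hc, ih]
      have hscan : pvScanBwd fig (m + 1) = pvScanBwd fig m := by simp [pvScanBwd, hc]
      rw [hscan, show ((m + 1 : Nat) : Int) = (m : Int) + 1 by push_cast; omega]
      have hb := pvScanBwd_lt fig m
      set b := pvScanBwd fig m with hbdef
      have h1 : max b 0 ≤ (m : Int) := by omega
      rw [pvFill_set_comm acc (max b 0) (m : Int) (m : Int) '1' (by omega) le_rfl (by omega)]
      conv_rhs => rw [pvFill, PySem.List.pyRange_one_succ_right h1, List.foldl_append]
      simp only [List.foldl_cons, List.foldl_nil]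
      rfl

-- A's right break-loop = fill up to the nearest right blocker (or the end)
theorem loopA_right (fig : List Char) (s : Nat) (acc : List Char) :
    pvLoopA fig (PySem.List.pyRange (s : Int) (fig.length : Int) 1) acc
      = pvFill acc (s : Int)
          (if pvScanFwd fig s ≠ -1 then pvScanFwd fig s + 1 else (fig.length : Int)) := by
  by_cases h : s < fig.length
  · rw [PySem.List.pyRange_one_cons (by omega : (s : Int) < (fig.length : Int))]
    simp only [pvLoopA]
    rw [PySem.List.pyGet?_natCast]
    have hgetE : fig[s]? = some fig[s] := by simp [h]
    have hscan : pvScanFwd fig s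
        = if fig[s] = '1' then (s : Int) else pvScanFwd fig (s + 1) := by
      rw [pvScanFwd]; simp [h]
    by_cases hc : fig[s] = '1'
    · rw [if_pos (by rw [hgetE, hc])]
      rw [hscan, if_pos hc, if_pos (show (s : Int) ≠ -1 by omega)]
      unfold pvFill
      rw [PySem.List.pyRange_one_singleton]
      simp
    · rw [if_neg (by rw [hgetE]; simp [hc])]
      rw [show ((s : Int) + 1) = ((s + 1 : Nat) : Int) by push_cast; omega,
          loopA_right fig (s + 1) (pvSet acc (s : Int) '1'),
          hscan, if_neg hc]
      set b := pvScanFwd fig (s + 1) with hbdef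
      have hE : (s : Int) < (if b ≠ -1 then b + 1 else (fig.length : Int)) := by
        rcases pvScanFwd_ge fig (s + 1) with hb | hb
        · rw [← hbdef] at hb; simp only [hb]; simp; omega
        · rw [← hbdef] at hb; split <;> omega
      conv_rhs => rw [pvFill, PySem.List.pyRange_one_cons hE]
      simp only [List.foldl_cons]
      rw [pvFill, show ((s + 1 : Nat) : Int) = (s : Int) + 1 by push_cast; omega]
  · have h1 : (fig.length : Int) ≤ (s : Int) := by omega
    rw [PySem.List.pyRange_one_eq_nil h1]
    have hscan : pvScanFwd fig s = -1 := by rw [pvScanFwd]; simp [h]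
    simp [pvLoopA, hscan, pvFill, PySem.List.pyRange_one_eq_nil h1]
termination_by fig.length - s

-- membership in a drop/take window = an indexed occurrence inside the window
theorem mem_drop_take (f : List Char) (a t : Nat) (c : Char) :
    c ∈ (f.drop a).take t ↔ ∃ k : Nat, a ≤ k ∧ k < a + t ∧ f[k]? = some c := by
  rw [List.mem_iff_getElem?]
  constructor
  · rintro ⟨i, hi⟩
    rw [List.getElem?_take] at hi
    by_cases hit : i < t
    · rw [if_pos hit, List.getElem?_drop] at hi
      exact ⟨a + i, by omega, by omega, hi⟩
    · rw [if_neg hit] at hi; exact absurd hi (by simp)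
  · rintro ⟨k, h1, h2, h3⟩
    refine ⟨k - a, ?_⟩
    rw [List.getElem?_take, if_pos (by omega), List.getElem?_drop,
        show a + (k - a) = k by omega]
    exact h3

-- characterisation of the backward scan (nearest blocker strictly below m)
theorem pvScanBwd_spec (f : List Char) (m : Nat) :
    (pvScanBwd f m = -1 ∧ ∀ k : Nat, k < m → f[k]? ≠ some '1') ∨
    (∃ b : Nat, pvScanBwd f m = (b : Int) ∧ b < m ∧ f[b]? = some '1' ∧
      ∀ k : Nat, b < k → k < m → f[k]? ≠ some '1') := by
  induction m with
  | zero => left; exact ⟨rfl, fun k hk => absurd hk (by omega)⟩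
  | succ n ih =>
    by_cases hc : f[n]? = some '1'
    · right
      exact ⟨n, by simp [pvScanBwd, hc], by omega, hc, fun k h1 h2 => by omega⟩
    · have hstep : pvScanBwd f (n + 1) = pvScanBwd f n := by simp [pvScanBwd, hc]
      rcases ih with ⟨h1, h2⟩ | ⟨b, h1, h2, h3, h4⟩
      · left
        refine ⟨by rw [hstep, h1], fun k hk => ?_⟩
        by_cases hkn : k < n
        · exact h2 k hkn
        · have : k = n := by omega
          rw [this]; exact hc
      · right
        refine ⟨b, by rw [hstep, h1], by omega, h3, fun k hk1 hk2 => ?_⟩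
        by_cases hkn : k < n
        · exact h4 k hk1 hkn
        · have : k = n := by omega
          rw [this]; exact hc

-- characterisation of the forward scan (nearest blocker at or above s)
theorem pvScanFwd_spec (f : List Char) (s : Nat) :
    (pvScanFwd f s = -1 ∧ ∀ k : Nat, s ≤ k → f[k]? ≠ some '1') ∨
    (∃ b : Nat, pvScanFwd f s = (b : Int) ∧ s ≤ b ∧ f[b]? = some '1' ∧
      ∀ k : Nat, s ≤ k → k < b → f[k]? ≠ some '1') := by
  by_cases h : s < f.length
  · have hget : f[s]? = some f[s] := by simp [h]
    by_cases hc : f[s] = '1'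
    · right
      refine ⟨s, ?_, le_rfl, by rw [hget, hc], fun k h1 h2 => by omega⟩
      rw [pvScanFwd]; simp [h, hc]
    · have hstep : pvScanFwd f s = pvScanFwd f (s + 1) := by
        rw [pvScanFwd]; simp [h, hc]
      have hcs : f[s]? ≠ some '1' := by rw [hget]; simp [hc]
      rcases pvScanFwd_spec f (s + 1) with ⟨h1, h2⟩ | ⟨b, h1, h2, h3, h4⟩
      · left
        refine ⟨by rw [hstep, h1], fun k hk => ?_⟩
        by_cases hks : s + 1 ≤ k
        · exact h2 k hks
        · have : k = s := by omega
          rw [this]; exact hcs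
      · right
        refine ⟨b, by rw [hstep, h1], by omega, h3, fun k hk1 hk2 => ?_⟩
        by_cases hks : s + 1 ≤ k
        · exact h4 k hks hk2
        · have : k = s := by omega
          rw [this]; exact hcs
  · left
    constructor
    · rw [pvScanFwd]; simp [h]
    · intro k hk
      have : f.length ≤ k := by omega
      simp [List.getElem?_eq_none this]
termination_by f.length - s

-- B's left slice test agrees with A's [nearest-left-blocker, attacker) fill window
theorem left_iff (f : List Char) (ai : Int) (h0 : 0 ≤ ai) (j : Nat) (hj : (j : Int) < ai) :
    ((PySem.List.slice f (some ((j : Int) + 1)) (some ai)).contains '1' = false) ↔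
      max (pvScanBwd f ai.toNat) 0 ≤ (j : Int) := by
  have hslice : PySem.List.slice f (some ((j : Int) + 1)) (some ai)
      = (f.drop (j + 1)).take (ai.toNat - (j + 1)) := by
    rw [PySem.List.slice_toNat f (by omega) h0]
    norm_num
  rw [hslice]
  have hmem := mem_drop_take f (j + 1) (ai.toNat - (j + 1)) '1'
  have hnm : ∀ P : Prop, ((f.drop (j + 1)).take (ai.toNat - (j + 1))).contains '1' = false ↔
      '1' ∉ (f.drop (j + 1)).take (ai.toNat - (j + 1)) := by
    intro _
    rw [← Bool.not_eq_true, List.contains_iff_mem]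
  rw [hnm True, hmem]
  rcases pvScanBwd_spec f ai.toNat with ⟨h1, h2⟩ | ⟨b, h1, h2, h3, h4⟩
  · rw [h1]
    constructor
    · intro _; omega
    · rintro _ ⟨k, hk1, hk2, hk3⟩
      exact h2 k (by omega) hk3
  · rw [h1]
    constructor
    · intro hcf
      by_contra hlt
      exact hcf ⟨b, by omega, by omega, h3⟩
    · rintro hle ⟨k, hk1, hk2, hk3⟩
      exact h4 k (by omega) (by omega) hk3

-- B's right slice test agrees with A's (attacker, nearest-right-blocker] fill window
theorem right_iff (f : List Char) (ai : Int) (h0 : 0 ≤ ai) (j : Nat)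
    (hj1 : ai < (j : Int)) (hj2 : (j : Int) < (f.length : Int)) :
    ((PySem.List.slice f (some (ai + 1)) (some (j : Int))).contains '1' = false) ↔
      (j : Int) < (if pvScanFwd f (ai + 1).toNat ≠ -1 then pvScanFwd f (ai + 1).toNat + 1
                   else (f.length : Int)) := by
  have hslice : PySem.List.slice f (some (ai + 1)) (some (j : Int))
      = (f.drop (ai + 1).toNat).take (j - (ai + 1).toNat) := by
    rw [PySem.List.slice_toNat f (by omega) (by omega)]
    norm_num
  rw [hslice, ← Bool.not_eq_true, List.contains_iff_mem,
      mem_drop_take f ((ai + 1).toNat) (j - (ai + 1).toNat) '1']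
  rcases pvScanFwd_spec f (ai + 1).toNat with ⟨h1, h2⟩ | ⟨b, h1, h2, h3, h4⟩
  · rw [h1]
    simp only [ne_eq, not_true_eq_false, if_false]
    constructor
    · intro _; omega
    · rintro _ ⟨k, hk1, hk2, hk3⟩
      exact h2 k hk1 hk3
  · rw [h1]
    rw [if_pos (show (b : Int) ≠ -1 by omega)]
    constructor
    · intro hcf
      by_contra hlt
      exact hcf ⟨b, h2, by omega, h3⟩
    · rintro hle ⟨k, hk1, hk2, hk3⟩
      exact h4 k hk1 (by omega) hk3

-- a non-(-1) forward scan lands on a real index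
theorem pvScanFwd_lt_len (f : List Char) (s : Nat) :
    pvScanFwd f s = -1 ∨ pvScanFwd f s < (f.length : Int) := by
  rcases pvScanFwd_spec f s with ⟨h1, _⟩ | ⟨b, h1, _, h3, _⟩
  · left; exact h1
  · right
    rw [h1]
    obtain ⟨hb, -⟩ := List.getElem?_eq_some_iff.mp h3
    omega

-- B's per-cell predicate = membership in A's two fill windows
theorem attacked_iff (f : List Char) (ai : Int) (gl gr : Bool) (h0 : 0 ≤ ai) (j : Nat) :
    (pvAttacked f ai gl gr (f.length : Int) (j : Int) = true) ↔
      ((gl = true ∧ max (pvScanBwd f ai.toNat) 0 ≤ (j : Int) ∧ (j : Int) < ai)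
       ∨ (gr = true ∧ ai + 1 ≤ (j : Int) ∧
          (j : Int) < (if pvScanFwd f (ai + 1).toNat ≠ -1 then pvScanFwd f (ai + 1).toNat + 1
                       else (f.length : Int)))) := by
  by_cases hc1 : gl = true ∧ (j : Int) < ai
  · rw [pvAttacked, if_pos hc1]
    simp only [Bool.not_eq_true']
    rw [left_iff f ai h0 j hc1.2]
    constructor
    · intro h; exact Or.inl ⟨hc1.1, h, hc1.2⟩
    · rintro (⟨_, h, _⟩ | ⟨_, h2, _⟩)
      · exact h
      · have h3 := hc1.2; omega
  · by_cases hc2 : gr = true ∧ ai < (j : Int) ∧ (j : Int) < (f.length : Int)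
    · rw [pvAttacked, if_neg hc1, if_pos hc2]
      simp only [Bool.not_eq_true']
      rw [right_iff f ai h0 j hc2.2.1 hc2.2.2]
      constructor
      · intro h
        have h1 := hc2.2.1
        exact Or.inr ⟨hc2.1, by omega, h⟩
      · rintro (⟨_, _, h⟩ | ⟨_, _, h⟩)
        · have h1 := hc2.2.1; omega
        · exact h
    · rw [pvAttacked, if_neg hc1, if_neg hc2]
      simp only [Bool.false_eq_true, false_iff]
      rintro (⟨hgl, _, hjlt⟩ | ⟨hgr, hge, hlt⟩)
      · exact hc1 ⟨hgl, hjlt⟩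
      · have hjn : (j : Int) < (f.length : Int) := by
          rcases pvScanFwd_lt_len f (ai + 1).toNat with h | h
          · rw [if_neg (by simp [h])] at hlt; exact hlt
          · by_cases hne : pvScanFwd f (ai + 1).toNat = -1
            · rw [if_neg (by simp [hne])] at hlt; exact hlt
            · rw [if_pos hne] at hlt; omega
        exact hc2 ⟨hgr, by omega, hjn⟩

-- the value at index j < 5 of A's (conditionally) filled buffer
theorem fillA_getElem? (f : List Char) (L ai R : Int) (gl gr : Bool)
    (hL0 : 0 ≤ L) (hai : 0 ≤ ai) (j : Nat) (hj5 : j < 5) :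
    (if gr = true then
        pvFill (if gl = true then pvFill ['0','0','0','0','0'] L ai else ['0','0','0','0','0'])
          (ai + 1) R
      else (if gl = true then pvFill ['0','0','0','0','0'] L ai else ['0','0','0','0','0']))[j]?
      = some (if (gl = true ∧ L ≤ (j : Int) ∧ (j : Int) < ai)
               ∨ (gr = true ∧ ai + 1 ≤ (j : Int) ∧ (j : Int) < R)
              then '1' else '0') := by
  have hz : (['0','0','0','0','0'] : List Char)[j]? = some '0' := by
    interval_cases j <;> rfl
  cases gl <;> cases gr <;>
    simp only [Bool.false_eq_true, if_true, if_false, false_and, true_and,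
      false_or, or_false]
  · rw [hz]
  · rw [pvFill_getElem? (ai + 1) R _ (by omega) j, hz]
    simp only [List.length_cons, List.length_nil]
    split_ifs <;> first | rfl | omega
  · rw [pvFill_getElem? L ai _ hL0 j, hz]
    simp only [List.length_cons, List.length_nil]
    split_ifs <;> first | rfl | omega
  · rw [pvFill_getElem? (ai + 1) R _ (by omega) j,
        pvFill_getElem? L ai _ hL0 j, hz]
    simp only [pvFill_length, List.length_cons, List.length_nil]
    split_ifs <;> first | rfl | omega

-- ===== VERDICT (by name: the statement is the Claim_ definition above) =====
theorem get_line_attack_mask_str_py_spec : Claim_equal_get_line_attack_mask_str_py := by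
  intro figure_mask attacker_i go_left go_right _ hpre
  obtain ⟨h0, hlen, -, -, -⟩ := hpre
  unfold Spec_get_line_attack_mask_str_py
  unfold get_line_attack_mask_str_py get_line_attack_mask_str_py_alt
  set f := figure_mask.toList with hf
  have hi : ((attacker_i.toNat : Nat) : Int) = attacker_i := by omega
  have his : (((attacker_i + 1).toNat : Nat) : Int) = attacker_i + 1 := by omega
  have hleft : ∀ acc, pvLoopA f (PySem.List.pyRange (attacker_i - 1) (-1) (-1)) acc
      = pvFill acc (max (pvScanBwd f attacker_i.toNat) 0) attacker_i := by
    intro acc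
    have h1 := loopA_left f attacker_i.toNat acc
    rw [hi] at h1
    exact h1
  have hright : ∀ acc, pvLoopA f (PySem.List.pyRange (attacker_i + 1) (f.length : Int) 1) acc
      = pvFill acc (attacker_i + 1)
          (if pvScanFwd f (attacker_i + 1).toNat ≠ -1 then pvScanFwd f (attacker_i + 1).toNat + 1
           else (f.length : Int)) := by
    intro acc
    have h1 := loopA_right f (attacker_i + 1).toNat acc
    rw [his] at h1
    exact h1
  simp only [hleft, hright]
  apply congrArg String.mk
  apply List.ext_getElem?
  intro j
  by_cases hj5 : j < 5
  · have hB := PySem.List.getElem?_map_pyRange_zero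
        (fun j => if pvAttacked f attacker_i go_left go_right (f.length : Int) j then '1' else '0') 5 j hj5
    simp only [Nat.cast_ofNat] at hB
    rw [hB, fillA_getElem? f (max (pvScanBwd f attacker_i.toNat) 0) attacker_i _ go_left go_right
          (by omega) h0 j hj5]
    congr 1
    exact ((if_congr (attacked_iff f attacker_i go_left go_right h0 j) rfl rfl)).symm
  · have hBn : ((PySem.List.pyRange 0 5 1).map
        (fun j => if pvAttacked f attacker_i go_left go_right (f.length : Int) j then '1' else '0'))[j]? = none := by
      apply List.getElem?_eq_none
      rw [List.length_map, PySem.List.length_pyRange_one]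
      omega
    rw [hBn]
    apply List.getElem?_eq_none
    cases go_left <;> cases go_right <;>
      simp [pvFill_length] <;> omega
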